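-- pv_equiv track=rewrite | github.com/rebuilder945/FL_research | ast_research/python_code_5.23/lastterm_page10/success_code/徐琪琦-2770-2023-05-27_11_29_09.py | bianweici
-- ===== SOURCE A (Python) =====
-- def bianweici(a,b):
--     if len(a) != len(b) or a == b:
--         return False
--     else:
--         for i in a:
--             if i not in b:
--                 return False
--             else:
--                 if a.count(i) >1:
--                     if a.count(i) != b.count(i):
--                         return False
--         return True
-- ===== SOURCE B (Python) =====
-- def bianweici(a, b):
--     return sorted(a) == sorted(b) and a != b
-- ===== Notes on version B (the rewrite author's own statement) =====
-- stated objective: idiomatic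
-- what changed: Replaces the per-character membership and repeated count scans with the standard sort-then-compare anagram check plus an inequality test.
import Mathlib
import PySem

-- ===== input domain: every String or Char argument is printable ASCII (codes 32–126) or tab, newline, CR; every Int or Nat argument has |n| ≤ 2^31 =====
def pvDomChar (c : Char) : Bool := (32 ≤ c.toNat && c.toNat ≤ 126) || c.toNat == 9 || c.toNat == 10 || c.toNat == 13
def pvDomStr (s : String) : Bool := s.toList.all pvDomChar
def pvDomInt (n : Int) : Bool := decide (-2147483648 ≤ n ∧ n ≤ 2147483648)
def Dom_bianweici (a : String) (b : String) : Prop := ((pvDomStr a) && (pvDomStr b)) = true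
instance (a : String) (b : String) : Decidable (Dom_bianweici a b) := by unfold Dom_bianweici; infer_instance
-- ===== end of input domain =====

-- B replaces A's per-character membership tests and repeated count scans by the
-- idiomatic sort-then-compare anagram check plus an inequality test.

-- ===== PORT A =====
-- A's for-loop with early returns: check each char of a for membership in b and,
-- when it repeats in a, for count equality.
def bianweiciLoop (la lb : List Char) : List Char → Bool
  | [] => true
  | i :: rest =>
    if !lb.contains i then false
    else if la.count i > 1 && la.count i != lb.count i then false
    else bianweiciLoop la lb rest

def bianweici (a : String) (b : String) : Bool :=
  let la := a.toList
  let lb := b.toList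
  if la.length != lb.length || la == lb then false
  else bianweiciLoop la lb la

-- ===== PORT B =====
def bianweici_alt (a : String) (b : String) : Bool :=
  let la := a.toList
  let lb := b.toList
  (PySem.List.sorted la (fun x => x) false == PySem.List.sorted lb (fun x => x) false)
    && la != lb

-- ===== PRECONDITION & SPEC =====
def Spec_bianweici (a : String) (b : String) (out : Bool) : Prop := out = bianweici_alt a b
instance (a : String) (b : String) (out : Bool) : Decidable (Spec_bianweici a b out) := by unfold Spec_bianweici; infer_instance

-- ===== CLAIM (what is proved, stated in full; the proofs are below) =====
def Claim_equal_bianweici : Prop := ∀ (a : String) (b : String), Dom_bianweici a b → Spec_bianweici a b (bianweici a b)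

-- ===== LEMMAS AND PROOFS =====

-- the loop returns true iff every traversed char passes A's two checks
theorem bianweiciLoop_true_iff (la lb : List Char) (l : List Char) :
    bianweiciLoop la lb l = true ↔
      ∀ i ∈ l, i ∈ lb ∧ (la.count i > 1 → la.count i = lb.count i) := by
  induction l with
  | nil => simp [bianweiciLoop]
  | cons i rest ih =>
    simp only [bianweiciLoop, List.mem_cons]
    by_cases hmem : i ∈ lb
    · rw [if_neg (by simp [hmem])]
      by_cases hc : List.count i la > 1 ∧ List.count i la ≠ List.count i lb
      · rw [if_pos (by simp [bne_iff_ne, hc.1, hc.2])]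
        simp only [Bool.false_eq_true, false_iff]
        intro h
        exact hc.2 ((h i (Or.inl rfl)).2 hc.1)
      · have hcond : (decide (List.count i la > 1) && (List.count i la != List.count i lb)) = false := by
          rcases not_and_or.mp hc with h1 | h2
          · simp [h1]
          · simp [not_not.mp h2]
        rw [if_neg (by simp [hcond])]
        rw [ih]
        constructor
        · intro h
          rintro j (rfl | hj)
          · refine ⟨hmem, fun hgt => ?_⟩
            rcases not_and_or.mp hc with h1 | h2
            · exact absurd hgt h1
            · exact not_not.mp h2
          · exact h j hj
        · intro h j hj; exact h j (Or.inr hj)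
    · rw [if_pos (by simp [hmem])]
      simp only [Bool.false_eq_true, false_iff]
      intro h
      exact hmem (h i (Or.inl rfl)).1

-- with equal lengths, A's checks characterise being a permutation
theorem loop_iff_perm (la lb : List Char) (hlen : la.length = lb.length) :
    bianweiciLoop la lb la = true ↔ la.Perm lb := by
  rw [bianweiciLoop_true_iff]
  constructor
  · intro h
    have hsub : List.Subperm la lb := by
      rw [List.subperm_ext_iff]
      intro x hx
      rcases h x hx with ⟨hmem, hcnt⟩
      by_cases hgt : la.count x > 1
      · exact (hcnt hgt).le
      · have h1 : la.count x ≤ 1 := Nat.not_lt.mp hgt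
        have h2 : 1 ≤ lb.count x := List.count_pos_iff.mpr hmem
        omega
    exact hsub.perm_of_length_le (le_of_eq hlen.symm)
  · intro hp i hi
    exact ⟨hp.mem_iff.mp hi, fun _ => hp.count_eq i⟩

theorem bianweici_eq (a b : String) : bianweici a b = bianweici_alt a b := by
  unfold bianweici bianweici_alt
  set la := a.toList
  set lb := b.toList
  by_cases heq : la = lb
  · simp [heq]
  · by_cases hlen : la.length = lb.length
    · rw [if_neg (by simp [hlen, heq])]
      rw [Bool.eq_iff_iff, Bool.and_eq_true, beq_iff_eq, bne_iff_ne,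
        PySem.List.sorted_id_eq_sorted_id_iff_perm]
      constructor
      · intro h
        exact ⟨(loop_iff_perm la lb hlen).mp h, heq⟩
      · intro h
        exact (loop_iff_perm la lb hlen).mpr h.1
    · rw [if_pos (by simp [hlen])]
      have hne : ¬ la.Perm lb := fun hp => hlen hp.length_eq
      rw [← PySem.List.sorted_id_eq_sorted_id_iff_perm] at hne
      simp [hne]

-- ===== VERDICT (by name: the statement is the Claim_ definition above) =====
theorem bianweici_spec : Claim_equal_bianweici := by
  intro a b _
  unfold Spec_bianweici
  exact bianweici_eq a b
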